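-- pv_equiv track=rewrite | github.com/anhed0nic/Leviathan | leviathan/modules/discovery/network_discovery.py | _identify_services
-- ===== SOURCE A (Python) =====
-- from typing import List, Dict, Any, Optional, Tuple
--
-- def _identify_services(open_ports: List[Dict[str, Any]]) -> Dict[str, List[Dict[str, Any]]]:
--     """Group open ports by service type."""
--     services = {}
--
--     for port_info in open_ports:
--         service = port_info["service"]
--         if service not in services:
--             services[service] = []
--         services[service].append(port_info)
--
--     return services
-- ===== SOURCE B (Python) =====
-- from typing import List, Dict, Any
--
-- def _identify_services(open_ports: List[Dict[str, Any]]) -> Dict[str, List[Dict[str, Any]]]: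
--     """Group open ports by service type: collect distinct services in first-seen
--     order, then build each bucket with one filtering pass per service."""
--     keys = dict.fromkeys(port_info["service"] for port_info in open_ports)
--     return {s: [p for p in open_ports if p["service"] == s] for s in keys}
-- ===== Notes on version B (the rewrite author's own statement) =====
-- stated objective: alternative
-- what changed: Replaces the streaming first-seen dict-bucket accumulator with a two-phase build: collect the distinct service keys in first-seen order, then construct each bucket by filtering the whole list per key.
import Mathlib
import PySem

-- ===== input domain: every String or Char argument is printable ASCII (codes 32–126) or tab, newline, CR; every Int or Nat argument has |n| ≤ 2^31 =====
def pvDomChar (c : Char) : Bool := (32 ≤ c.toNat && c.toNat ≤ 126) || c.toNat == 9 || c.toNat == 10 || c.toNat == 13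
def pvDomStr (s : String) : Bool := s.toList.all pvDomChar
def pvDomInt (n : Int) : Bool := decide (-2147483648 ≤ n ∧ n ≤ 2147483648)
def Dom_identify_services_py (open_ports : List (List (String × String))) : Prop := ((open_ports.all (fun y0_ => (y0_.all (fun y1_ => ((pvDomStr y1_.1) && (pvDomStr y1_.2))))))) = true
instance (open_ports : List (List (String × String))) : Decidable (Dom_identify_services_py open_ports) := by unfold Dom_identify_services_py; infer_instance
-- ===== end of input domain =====

-- B groups by building the first-seen key list and then one filter pass per key,
-- instead of A's streaming dict-bucket accumulator; return values proved equal on Pre_.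

-- ===== PORT A =====
-- p["service"] on the assoc-list dict: first match (none = KeyError, excluded by Pre_)
def pvSvc (p : List (String × String)) : Option String := List.lookup "service" p

-- services[service].append(port_info): update the (unique) bucket of `service` in place
def pvAppendTo (services : List (String × List (List (String × String)))) (s : String)
    (p : List (String × String)) : List (String × List (List (String × String))) :=
  match services with
  | [] => []
  | (k, v) :: rest => if k = s then (k, v ++ [p]) :: rest else (k, v) :: pvAppendTo rest s p

-- loop body of A: "if service not in services: services[service] = []; services[service].append(...)"
def pvStepA (services : List (String × List (List (String × String))))
    (port_info : List (String × String)) : List (String × List (List (String × String))) :=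
  match pvSvc port_info with
  | none => services  -- Python raises KeyError here; outside Pre_
  | some service =>
    let services :=
      if services.any (fun q => q.1 = service) then services else services ++ [(service, [])]
    pvAppendTo services service port_info

def identify_services_py (open_ports : List (List (String × String))) :
    List (String × List (List (String × String))) :=
  open_ports.foldl pvStepA []

-- ===== PORT B =====
-- dict.fromkeys(...): distinct services in first-seen order
def pvStepK (ks : List String) (port_info : List (String × String)) : List String :=
  match pvSvc port_info with
  | none => ks  -- Python raises KeyError here; outside Pre_
  | some s => if s ∈ ks then ks else ks ++ [s]

def pvKeysB (open_ports : List (List (String × String))) : List String :=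
  open_ports.foldl pvStepK []

def identify_services_py_alt (open_ports : List (List (String × String))) :
    List (String × List (List (String × String))) :=
  (pvKeysB open_ports).map (fun s => (s, open_ports.filter (fun p => pvSvc p == some s)))

-- ===== PRECONDITION & SPEC =====
-- Pre_ excludes exactly the inputs where some port dict lacks a "service" key:
-- there Python A raises KeyError (and Python B raises KeyError too).
def Pre_identify_services_py (open_ports : List (List (String × String))) : Prop :=
  ∀ p ∈ open_ports, (pvSvc p).isSome
instance (open_ports : List (List (String × String))) : Decidable (Pre_identify_services_py open_ports) := by unfold Pre_identify_services_py; infer_instance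

def pvWitness_identify_services_py : (List (List (String × String))) :=
  [[("service", "http"), ("port", "80")], [("service", "ssh")], [("service", "http"), ("port", "8080")]]

def Spec_identify_services_py (open_ports : List (List (String × String))) (out : List (String × List (List (String × String)))) : Prop := out = identify_services_py_alt open_ports
instance (open_ports : List (List (String × String))) (out : List (String × List (List (String × String)))) : Decidable (Spec_identify_services_py open_ports out) := by unfold Spec_identify_services_py; infer_instance

-- ===== CLAIM (what is proved, stated in full; the proofs are below) =====
def Claim_equal_identify_services_py : Prop := ∀ (open_ports : List (List (String × String))), Dom_identify_services_py open_ports → Pre_identify_services_py open_ports → Spec_identify_services_py open_ports (identify_services_py open_ports)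

-- ===== LEMMAS AND PROOFS =====

theorem A_snoc (xs : List (List (String × String))) (x : List (String × String)) :
    identify_services_py (xs ++ [x]) = pvStepA (identify_services_py xs) x := by
  simp [identify_services_py, List.foldl_append]

theorem keysB_snoc (xs : List (List (String × String))) (x : List (String × String)) :
    pvKeysB (xs ++ [x]) = pvStepK (pvKeysB xs) x := by
  simp [pvKeysB, List.foldl_append]

-- membership in the accumulated key list
theorem mem_keysB_foldl (xs : List (List (String × String))) (acc : List String) (s : String) :
    s ∈ xs.foldl pvStepK acc ↔ s ∈ acc ∨ ∃ p ∈ xs, pvSvc p = some s := by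
  induction xs generalizing acc with
  | nil => simp
  | cons x xs ih =>
    simp only [List.foldl_cons]
    rw [ih]
    cases h : pvSvc x with
    | none =>
      simp only [pvStepK, h]
      constructor
      · rintro (hs | hs)
        · exact Or.inl hs
        · obtain ⟨p, hp, hps⟩ := hs; exact Or.inr ⟨p, List.mem_cons_of_mem _ hp, hps⟩
      · rintro (hs | ⟨p, hp, hps⟩)
        · exact Or.inl hs
        · rcases List.mem_cons.mp hp with rfl | hp'
          · rw [h] at hps; cases hps
          · exact Or.inr ⟨p, hp', hps⟩
    | some t =>
      simp only [pvStepK, h]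
      by_cases ht : t ∈ acc
      · rw [if_pos ht]
        constructor
        · rintro (hs | hs)
          · exact Or.inl hs
          · obtain ⟨p, hp, hps⟩ := hs; exact Or.inr ⟨p, List.mem_cons_of_mem _ hp, hps⟩
        · rintro (hs | ⟨p, hp, hps⟩)
          · exact Or.inl hs
          · rcases List.mem_cons.mp hp with rfl | hp'
            · rw [h] at hps; cases hps; exact Or.inl ht
            · exact Or.inr ⟨p, hp', hps⟩
      · rw [if_neg ht]
        constructor
        · rintro (hs | hs)
          · rcases List.mem_append.mp hs with hs' | hs'
            · exact Or.inl hs'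
            · rcases List.mem_singleton.mp hs' with rfl
              exact Or.inr ⟨x, List.mem_cons_self .., h⟩
          · obtain ⟨p, hp, hps⟩ := hs; exact Or.inr ⟨p, List.mem_cons_of_mem _ hp, hps⟩
        · rintro (hs | ⟨p, hp, hps⟩)
          · exact Or.inl (List.mem_append.mpr (Or.inl hs))
          · rcases List.mem_cons.mp hp with rfl | hp'
            · rw [h] at hps; cases hps
              exact Or.inl (List.mem_append.mpr (Or.inr (List.mem_singleton.mpr rfl)))
            · exact Or.inr ⟨p, hp', hps⟩

theorem mem_keysB (xs : List (List (String × String))) (s : String) :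
    s ∈ pvKeysB xs ↔ ∃ p ∈ xs, pvSvc p = some s := by
  unfold pvKeysB; rw [mem_keysB_foldl]; simp

theorem nodup_keysB_foldl (xs : List (List (String × String))) (acc : List String)
    (hacc : acc.Nodup) : (xs.foldl pvStepK acc).Nodup := by
  induction xs generalizing acc with
  | nil => exact hacc
  | cons x xs ih =>
    simp only [List.foldl_cons]
    apply ih
    unfold pvStepK
    cases h : pvSvc x with
    | none => exact hacc
    | some t =>
      dsimp only
      by_cases ht : t ∈ acc
      · simpa [ht] using hacc
      · rw [if_neg ht]
        rw [List.nodup_append]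
        refine ⟨hacc, List.nodup_singleton _, ?_⟩
        intro a ha b hb
        rcases List.mem_singleton.mp hb with rfl
        exact fun hab => ht (hab ▸ ha)

theorem nodup_keysB (xs : List (List (String × String))) : (pvKeysB xs).Nodup :=
  nodup_keysB_foldl xs [] List.nodup_nil

-- appendTo on a bucket table indexed by a nodup key list containing s
theorem appendTo_map (K : List String) (hK : K.Nodup) (s : String) (hs : s ∈ K)
    (f : String → List (List (String × String))) (p : List (String × String)) :
    pvAppendTo (K.map (fun k => (k, f k))) s p =
      K.map (fun k => (k, f k ++ if k = s then [p] else [])) := by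
  induction K with
  | nil => simp at hs
  | cons k K ih =>
    simp only [List.map_cons, pvAppendTo]
    by_cases hk : k = s
    · subst hk
      rw [if_pos rfl]
      have hkK : k ∉ K := (List.nodup_cons.mp hK).1
      simp only [List.cons.injEq, Prod.mk.injEq, true_and]
      refine ⟨rfl, ?_⟩
      apply List.map_congr_left
      intro y hy
      have hyk : ¬ y = k := fun hyk => hkK (hyk ▸ hy)
      simp [hyk]
    · rw [if_neg hk]
      have hsK : s ∈ K := by
        rcases List.mem_cons.mp hs with h1 | h1
        · exact absurd h1.symm hk
        · exact h1
      simp only [List.cons.injEq, Prod.mk.injEq, true_and]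
      refine ⟨by simp [hk], ih (List.nodup_cons.mp hK).2 hsK⟩

-- appending into a freshly created bucket at the end of the table
theorem appendTo_append_new (L : List (String × List (List (String × String))))
    (t : String) (v : List (List (String × String))) (x : List (String × String))
    (h : ∀ q ∈ L, q.1 ≠ t) :
    pvAppendTo (L ++ [(t, v)]) t x = L ++ [(t, v ++ [x])] := by
  induction L with
  | nil => simp [pvAppendTo]
  | cons q L ih =>
    obtain ⟨k, w⟩ := q
    have hk : k ≠ t := h (k, w) (List.mem_cons_self ..)
    simp only [List.cons_append, pvAppendTo, if_neg hk, List.cons.injEq, true_and]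
    exact ih (fun q hq => h q (List.mem_cons_of_mem _ hq))

-- main invariant: A's fold over any list equals B's table
theorem foldA_eq (xs : List (List (String × String))) :
    identify_services_py xs =
      (pvKeysB xs).map (fun s => (s, xs.filter (fun p => pvSvc p == some s))) := by
  induction xs using List.reverseRecOn with
  | nil => simp [identify_services_py, pvKeysB]
  | append_singleton xs x ih =>
    rw [A_snoc, keysB_snoc, ih]
    unfold pvStepA pvStepK
    cases h : pvSvc x with
    | none =>
      apply List.map_congr_left
      intro s _
      simp [List.filter_append, h]
    | some t =>
      dsimp only
      have hnodup : (pvKeysB xs).Nodup := nodup_keysB xs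
      by_cases ht : t ∈ pvKeysB xs
      · -- existing bucket: key list unchanged, bucket of t extended
        have hany : ((pvKeysB xs).map
            (fun s => (s, xs.filter (fun p => pvSvc p == some s)))).any
            (fun q => q.1 = t) = true := by
          simp only [List.any_eq_true, List.mem_map]
          exact ⟨(t, xs.filter (fun p => pvSvc p == some t)), ⟨t, ht, rfl⟩, by simp⟩
        rw [if_pos ht, if_pos hany,
          appendTo_map (pvKeysB xs) hnodup t ht
            (fun s => xs.filter (fun p => pvSvc p == some s)) x]
        apply List.map_congr_left
        intro s _
        simp only [Prod.mk.injEq, true_and, List.filter_append, List.filter_cons,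
          List.filter_nil, h]
        by_cases hst : s = t
        · subst hst; simp
        · simp [hst, Ne.symm hst]
      · -- new bucket appended at the end
        have hany : ((pvKeysB xs).map
            (fun s => (s, xs.filter (fun p => pvSvc p == some s)))).any
            (fun q => q.1 = t) = false := by
          simp only [List.any_eq_false, List.mem_map]
          rintro q ⟨k, hk, rfl⟩
          simp only [decide_eq_true_eq]
          exact fun hkt => ht (hkt ▸ hk)
        have htf : xs.filter (fun p => pvSvc p == some t) = [] := by
          rw [List.filter_eq_nil_iff]
          intro p hp hpt
          exact ht ((mem_keysB xs t).mpr ⟨p, hp, by simpa using hpt⟩)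
        rw [if_neg ht, if_neg (by simp [hany]),
          appendTo_append_new _ t [] x (by
            intro q hq
            obtain ⟨k, hk, rfl⟩ := List.mem_map.mp hq
            exact fun hkt => ht (hkt ▸ hk)),
          List.map_append]
        congr 1
        · apply List.map_congr_left
          intro s hsK
          have hst : s ≠ t := fun hst => ht (hst ▸ hsK)
          simp [List.filter_append, h, Ne.symm hst]
        · simp [List.filter_append, htf, h]

-- ===== VERDICT (by name: the statement is the Claim_ definition above) =====
theorem identify_services_py_spec : Claim_equal_identify_services_py := by
  intro open_ports _ _
  unfold Spec_identify_services_py identify_services_py_alt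
  exact foldA_eq open_ports
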